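-- pv_equiv track=rewrite | github.com/rifachnia/Elderglade | connect4.py | distribute_referral_codes
-- ===== SOURCE A (Python) =====
-- ACCOUNTS_PER_REFERRAL = 10  # Number of accounts to assign to each referral code
--
-- def distribute_referral_codes(private_keys, referral_codes):
--     """Distribute private keys evenly across referral codes"""
--     distributed = []
--     referral_index = 0
--
--     for i, private_key in enumerate(private_keys):
--         # If we have referral codes, use them in round-robin fashion
--         if referral_codes:
--             code = referral_codes[referral_index % len(referral_codes)]
--             # Move to next code every ACCOUNTS_PER_REFERRAL accounts
--             if (i + 1) % ACCOUNTS_PER_REFERRAL == 0: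
--                 referral_index += 1
--         else:
--             code = ""
--
--         distributed.append((private_key, code))
--
--     return distributed
-- ===== SOURCE B (Python) =====
-- ACCOUNTS_PER_REFERRAL = 10  # Number of accounts to assign to each referral code
--
-- def distribute_referral_codes(private_keys, referral_codes):
--     """Distribute private keys evenly across referral codes"""
--     if not referral_codes:
--         return [(pk, "") for pk in private_keys]
--
--     distributed = []
--     j = 0
--     start = 0
--     while start < len(private_keys):
--         # the whole next block of ACCOUNTS_PER_REFERRAL keys gets referral code j
--         code = referral_codes[j % len(referral_codes)]
--         for pk in private_keys[start:start + ACCOUNTS_PER_REFERRAL]: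
--             distributed.append((pk, code))
--         j += 1
--         start += ACCOUNTS_PER_REFERRAL
--     return distributed
-- ===== Notes on version B (the rewrite author's own statement) =====
-- stated objective: alternative
-- what changed: Replaced the element-wise loop with its stateful referral_index counter and conditional increment by a block decomposition: a loop over block starts that slices off the next 10 keys at once and pairs the whole block with one referral code.
import Mathlib
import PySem

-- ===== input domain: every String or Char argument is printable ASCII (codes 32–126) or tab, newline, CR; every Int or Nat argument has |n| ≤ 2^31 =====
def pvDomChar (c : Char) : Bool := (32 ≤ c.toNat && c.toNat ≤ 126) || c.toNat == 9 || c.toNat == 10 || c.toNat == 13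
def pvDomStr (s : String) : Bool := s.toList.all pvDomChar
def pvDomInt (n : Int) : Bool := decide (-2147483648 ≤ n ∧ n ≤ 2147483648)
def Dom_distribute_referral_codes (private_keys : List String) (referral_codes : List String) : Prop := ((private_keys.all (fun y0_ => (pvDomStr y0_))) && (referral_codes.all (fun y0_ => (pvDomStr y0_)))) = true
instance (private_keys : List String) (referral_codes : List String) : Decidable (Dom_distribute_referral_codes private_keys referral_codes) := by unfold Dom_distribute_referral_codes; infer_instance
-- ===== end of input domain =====

-- B replaces A's element-wise loop with its stateful counter by a block decomposition: it slices
-- off whole blocks of 10 keys and pairs each block with one referral code; equal return values.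

-- ===== PORT A =====
-- A's loop over enumerate(private_keys) carrying the running referral_index; the Python indexing
-- referral_codes[referral_index % len(referral_codes)] is always in range (the branch requires
-- referral_codes nonempty), rendered with getD "" whose default is never reached.
def distribute_referral_codes_goA (referral_codes : List String) : Nat → Nat → List String → List (String × String)
  | _, _, [] => []
  | i, referral_index, private_key :: rest =>
    if referral_codes = [] then
      (private_key, "") :: distribute_referral_codes_goA referral_codes (i + 1) referral_index rest
    else
      let code := referral_codes.getD (referral_index % referral_codes.length) ""
      let referral_index' := if (i + 1) % 10 = 0 then referral_index + 1 else referral_index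
      (private_key, code) :: distribute_referral_codes_goA referral_codes (i + 1) referral_index' rest

def distribute_referral_codes (private_keys : List String) (referral_codes : List String) : List (String × String) :=
  distribute_referral_codes_goA referral_codes 0 0 private_keys

-- ===== PORT B =====
-- Source B's while loop over block starts: the slice private_keys[start:start+10] (= drop start, take 10,
-- exact for these nonnegative in-order bounds) is appended with code j, then j += 1, start += 10.
def distribute_referral_codes_goB (referral_codes : List String) (private_keys : List String) : Nat → Nat → List (String × String)
  | j, start =>
    if _h : start < private_keys.length then
      ((private_keys.drop start).take 10).map
          (fun pk => (pk, referral_codes.getD (j % referral_codes.length) ""))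
        ++ distribute_referral_codes_goB referral_codes private_keys (j + 1) (start + 10)
    else []
termination_by _ start => private_keys.length - start
decreasing_by omega

def distribute_referral_codes_alt (private_keys : List String) (referral_codes : List String) : List (String × String) :=
  if referral_codes = [] then private_keys.map (fun pk => (pk, ""))
  else distribute_referral_codes_goB referral_codes private_keys 0 0

-- ===== PRECONDITION & SPEC =====
def Spec_distribute_referral_codes (private_keys : List String) (referral_codes : List String) (out : List (String × String)) : Prop := out = distribute_referral_codes_alt private_keys referral_codes
instance (private_keys : List String) (referral_codes : List String) (out : List (String × String)) : Decidable (Spec_distribute_referral_codes private_keys referral_codes out) := by unfold Spec_distribute_referral_codes; infer_instance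

-- ===== CLAIM (what is proved, stated in full; the proofs are below) =====
def Claim_equal_distribute_referral_codes : Prop := ∀ (private_keys : List String) (referral_codes : List String), Dom_distribute_referral_codes private_keys referral_codes → Spec_distribute_referral_codes private_keys referral_codes (distribute_referral_codes private_keys referral_codes)

-- ===== LEMMAS AND PROOFS =====
-- With no referral codes, A's loop just pairs every key with "" regardless of its counters.
theorem goA_nil (referral_codes : List String) (h : referral_codes = []) :
    ∀ (private_keys : List String) (i referral_index : Nat),
      distribute_referral_codes_goA referral_codes i referral_index private_keys =
        private_keys.map (fun pk => (pk, "")) := by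
  intro private_keys
  induction private_keys with
  | nil => intro i r; simp [distribute_referral_codes_goA]
  | cons pk rest ih =>
    intro i r
    simp [distribute_referral_codes_goA, if_pos h, ih]

-- Both loops agree in closed form: element at global index i gets code (i/10) % len.
-- A-side invariant: when the loop is about to process global index i, referral_index = i/10.
theorem goA_inv (referral_codes : List String) (h : ¬ referral_codes = []) :
    ∀ (private_keys : List String) (i : Nat),
      distribute_referral_codes_goA referral_codes i (i / 10) private_keys =
        private_keys.mapIdx (fun j pk =>
          (pk, referral_codes.getD (((i + j) / 10) % referral_codes.length) "")) := by
  intro private_keys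
  induction private_keys with
  | nil => intro i; simp [distribute_referral_codes_goA]
  | cons pk rest ih =>
    intro i
    have hstep : (if (i + 1) % 10 = 0 then i / 10 + 1 else i / 10) = (i + 1) / 10 := by
      by_cases h10 : (i + 1) % 10 = 0 <;> simp [h10] <;> omega
    simp only [distribute_referral_codes_goA, if_neg h, hstep, ih (i + 1), List.mapIdx_cons]
    congr 1
    have hf : (fun (j : Nat) (pk : String) =>
        (pk, referral_codes.getD ((i + 1 + j) / 10 % referral_codes.length) "")) =
        (fun (j : Nat) (pk : String) =>
        (pk, referral_codes.getD ((i + (j + 1)) / 10 % referral_codes.length) "")) := by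
      funext j pk
      rw [show i + 1 + j = i + (j + 1) from by omega]
    rw [hf]

-- B-side closed form, by strong induction on the number of keys not yet consumed:
-- block j of the loop covers the keys at offsets 10*j … 10*j+9 of the remaining suffix.
theorem goB_closed (referral_codes : List String) (private_keys : List String) :
    ∀ (n start j : Nat), private_keys.length - start ≤ n →
      distribute_referral_codes_goB referral_codes private_keys j start =
        (private_keys.drop start).mapIdx (fun i pk =>
          (pk, referral_codes.getD (((j * 10 + i) / 10) % referral_codes.length) "")) := by
  intro n
  induction n with
  | zero =>
    intro start j hlen
    have hge : private_keys.length ≤ start := by omega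
    rw [distribute_referral_codes_goB, dif_neg (by omega), List.drop_eq_nil_of_le hge]
    simp
  | succ n ih =>
    intro start j hlen
    by_cases h : start < private_keys.length
    · rw [distribute_referral_codes_goB, dif_pos h]
      have hrec := ih (start + 10) (j + 1) (by omega)
      have hdd : private_keys.drop (start + 10) = (private_keys.drop start).drop 10 := by
        rw [List.drop_drop]
      rw [hrec, hdd]
      conv_rhs => rw [← List.take_append_drop 10 (private_keys.drop start), List.mapIdx_append]
      congr 1
      · -- the first block: every relative index i < 10 yields the same code j
        apply List.ext_getElem
        · simp
        · intro i h1 h2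
          have hi : i < 10 := lt_of_lt_of_le h1 (by simp [List.length_take])
          have hd : (j * 10 + i) / 10 = j := by omega
          simp only [List.getElem_map, List.getElem_mapIdx, hd]
      · -- the remaining blocks: index shift by (take 10).length
        have hlend : (private_keys.drop start).length = private_keys.length - start := by simp
        by_cases hge : 10 ≤ (private_keys.drop start).length
        · have htl : ((private_keys.drop start).take 10).length = 10 := by
            simp [List.length_take]; omega
          rw [htl]
          congr 1
          funext i pk
          have : j * 10 + (i + 10) = (j + 1) * 10 + i := by ring
          rw [this]
        · have hnil : (private_keys.drop start).drop 10 = [] := by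
            apply List.drop_eq_nil_of_le; omega
          rw [hnil]; simp
    · rw [distribute_referral_codes_goB, dif_neg h,
          List.drop_eq_nil_of_le (by omega : private_keys.length ≤ start)]
      simp

-- ===== VERDICT (by name: the statement is the Claim_ definition above) =====
theorem distribute_referral_codes_spec : Claim_equal_distribute_referral_codes := by
  intro private_keys referral_codes _
  unfold Spec_distribute_referral_codes distribute_referral_codes distribute_referral_codes_alt
  by_cases h : referral_codes = []
  · rw [goA_nil referral_codes h private_keys 0 0]
    simp [h]
  · rw [if_neg h]
    have hA := goA_inv referral_codes h private_keys 0
    have hB := goB_closed referral_codes private_keys private_keys.length 0 0 (by omega)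
    simp only [Nat.zero_div, Nat.zero_add] at hA
    simp only [Nat.zero_mul, Nat.zero_add, List.drop_zero] at hB
    rw [hA, hB]
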